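-- pv_equiv track=rewrite | github.com/nami4mo/competitive-programming-problems | practice/arc/arc124_b.py | check
-- ===== SOURCE A (Python) =====
-- def check(al,bl,v):
--     d={}
--     for b in bl:
--         d.setdefault(b,0)
--         d[b]+=1
--     for a in al:
--         c=v^a
--         if (not c in d) or d[c]==0:break
--         d[c]-=1
--     else:
--         return True
--     return False
-- ===== SOURCE B (Python) =====
-- def check(al, bl, v):
--     # Multiset containment: Counter(v^a for a in al) <= Counter(bl),
--     # built with plain dicts (A imports nothing).
--     need = {}
--     for a in al:
--         c = v ^ a
--         need[c] = need.get(c, 0) + 1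
--     have = {}
--     for b in bl:
--         have[b] = have.get(b, 0) + 1
--     return all(have.get(c, 0) >= n for c, n in need.items())
-- ===== Notes on version B (the rewrite author's own statement) =====
-- stated objective: simpler
-- what changed: Replaces A's destructive scan (build a count dict of bl, then decrement with an early break while walking al) by building two immutable counters (of the xor-transformed al and of bl) and returning a single multiset-containment comparison.
import Mathlib
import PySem

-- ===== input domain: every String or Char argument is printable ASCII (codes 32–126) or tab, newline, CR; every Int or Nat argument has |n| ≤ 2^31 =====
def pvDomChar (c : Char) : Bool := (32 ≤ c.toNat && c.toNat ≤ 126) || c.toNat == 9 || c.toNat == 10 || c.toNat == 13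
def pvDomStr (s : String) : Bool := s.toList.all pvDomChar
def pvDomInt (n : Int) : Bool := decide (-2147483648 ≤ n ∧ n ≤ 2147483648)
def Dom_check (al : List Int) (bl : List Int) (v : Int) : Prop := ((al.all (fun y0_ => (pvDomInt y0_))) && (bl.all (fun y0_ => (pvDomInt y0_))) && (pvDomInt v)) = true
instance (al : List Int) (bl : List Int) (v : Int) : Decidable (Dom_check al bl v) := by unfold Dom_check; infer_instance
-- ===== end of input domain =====

-- B replaces A's decrement-with-early-break scan by two immutable counters and one containment check (simpler; same cost).

-- ===== PORT A =====
-- d = {}; for b in bl: d.setdefault(b, 0); d[b] += 1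
def checkBuild (bl : List Int) : PySem.Dict Int Int :=
  bl.foldl (fun d b => (d.setdefault b 0).modify b 0 (· + 1)) PySem.Dict.empty

-- for a in al: c = v ^ a; if (not c in d) or d[c] == 0: break; d[c] -= 1; else: return True — False after break
def checkLoop (v : Int) : PySem.Dict Int Int → List Int → Bool
  | _, [] => true
  | d, a :: rest =>
    let c := PySem.Int.bxor v a
    if !d.contains c || d.getD c 0 == 0 then false
    else checkLoop v (d.modify c 0 (· - 1)) rest

def check (al : List Int) (bl : List Int) (v : Int) : Bool :=
  checkLoop v (checkBuild bl) al

-- ===== PORT B =====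
def check_alt (al : List Int) (bl : List Int) (v : Int) : Bool :=
  let need : PySem.Dict Int Int := al.foldl (fun d a => d.insert (PySem.Int.bxor v a) (d.getD (PySem.Int.bxor v a) 0 + 1)) PySem.Dict.empty
  let haveD : PySem.Dict Int Int := bl.foldl (fun d b => d.insert b (d.getD b 0 + 1)) PySem.Dict.empty
  need.items.all (fun p => decide (p.2 ≤ haveD.getD p.1 0))

-- ===== PRECONDITION & SPEC =====
def Spec_check (al : List Int) (bl : List Int) (v : Int) (out : Bool) : Prop := out = check_alt al bl v
instance (al : List Int) (bl : List Int) (v : Int) (out : Bool) : Decidable (Spec_check al bl v out) := by unfold Spec_check; infer_instance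

-- ===== CLAIM (what is proved, stated in full; the proofs are below) =====
def Claim_equal_check : Prop := ∀ (al : List Int) (bl : List Int) (v : Int), Dom_check al bl v → Spec_check al bl v (check al bl v)

-- ===== LEMMAS AND PROOFS =====

-- A's counter build: each value is the count in bl
theorem getD_step (d : PySem.Dict Int Int) (b k : Int) :
    ((d.setdefault b 0).modify b 0 (· + 1)).getD k 0
      = d.getD k 0 + (if k = b then 1 else 0) := by
  rw [PySem.Dict.getD_modify]
  by_cases hc : d.contains b = true
  · rw [PySem.Dict.setdefault_of_contains d 0 hc]
    split_ifs with h <;> simp [h]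
  · rw [PySem.Dict.setdefault_of_not_contains d 0 (by simpa using hc)]
    have h0 : d.getD b 0 = 0 := PySem.Dict.getD_of_not_contains d 0 (by simpa using hc)
    split_ifs with h <;> simp [PySem.Dict.getD_insert, h, h0]

theorem getD_checkBuild_gen (bl : List Int) (k : Int) :
    ∀ d : PySem.Dict Int Int,
      (bl.foldl (fun d b => (d.setdefault b 0).modify b 0 (· + 1)) d).getD k 0
        = d.getD k 0 + bl.count k := by
  induction bl with
  | nil => intro d; simp
  | cons b rest ih =>
    intro d
    simp only [List.foldl_cons, ih, getD_step, List.count_cons]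
    by_cases h : k = b <;> simp [h, beq_iff_eq] <;> omega

theorem getD_checkBuild (bl : List Int) (k : Int) :
    (checkBuild bl).getD k 0 = bl.count k := by
  simpa using getD_checkBuild_gen bl k PySem.Dict.empty

-- the break test '(not c in d) or d[c] == 0' fires exactly when d.getD c 0 = 0
theorem break_iff (d : PySem.Dict Int Int) (c : Int) :
    (!d.contains c || d.getD c 0 == 0) = true ↔ d.getD c 0 = 0 := by
  by_cases hc : d.contains c = true
  · simp [hc]
  · have h0 : d.getD c 0 = 0 := PySem.Dict.getD_of_not_contains d 0 (by simpa using hc)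
    simp [hc, h0]

-- characterisation of A's loop on any dict with non-negative counts
theorem checkLoop_iff (v : Int) (al : List Int) :
    ∀ d : PySem.Dict Int Int, (∀ k, 0 ≤ d.getD k 0) →
      (checkLoop v d al = true ↔
        ∀ k, ((al.map (fun a => PySem.Int.bxor v a)).count k : Int) ≤ d.getD k 0) := by
  induction al with
  | nil => intro d h; simpa [checkLoop] using h
  | cons a rest ih =>
    intro d h
    simp only [checkLoop]
    by_cases hz : d.getD (PySem.Int.bxor v a) 0 = 0
    · rw [if_pos ((break_iff _ _).mpr hz)]
      constructor
      · intro hfalse; exact absurd hfalse (by simp)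
      · intro hall
        have := hall (PySem.Int.bxor v a)
        simp [hz] at this
        omega
    · rw [if_neg (by simpa using (break_iff d (PySem.Int.bxor v a)).not.mpr hz)]
      have hnn : ∀ k, 0 ≤ (d.modify (PySem.Int.bxor v a) 0 (· - 1)).getD k 0 := by
        intro k
        rw [PySem.Dict.getD_modify]
        split_ifs with hk
        · have := h (PySem.Int.bxor v a); omega
        · exact h k
      rw [ih _ hnn]
      constructor
      · intro hall k
        have := hall k
        rw [PySem.Dict.getD_modify] at this
        simp only [List.map_cons, List.count_cons] at *
        split_ifs at this with hk
        · subst hk; simp at *; omega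
        · have hne : ¬ ((PySem.Int.bxor v a) == k) = true := by
            simp; intro hh; exact hk hh.symm
          simp [hne] at *; omega
      · intro hall k
        have := hall k
        rw [PySem.Dict.getD_modify]
        simp only [List.map_cons, List.count_cons] at *
        split_ifs with hk
        · subst hk; simp at *; omega
        · have hne : ¬ ((PySem.Int.bxor v a) == k) = true := by
            simp; intro hh; exact hk hh.symm
          simp [hne] at *; omega

theorem check_iff (al bl : List Int) (v : Int) :
    check al bl v = true ↔
      ∀ k, ((al.map (fun a => PySem.Int.bxor v a)).count k : Int) ≤ (bl.count k : Int) := by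
  unfold check
  rw [checkLoop_iff v al (checkBuild bl) (fun k => by rw [getD_checkBuild]; positivity)]
  simp [getD_checkBuild]

theorem check_alt_iff (al bl : List Int) (v : Int) :
    check_alt al bl v = true ↔
      ∀ k, ((al.map (fun a => PySem.Int.bxor v a)).count k : Int) ≤ (bl.count k : Int) := by
  unfold check_alt
  have hneed : al.foldl (fun d a => d.insert (PySem.Int.bxor v a) (d.getD (PySem.Int.bxor v a) 0 + 1)) PySem.Dict.empty
      = PySem.Dict.counter (al.map (fun a => PySem.Int.bxor v a)) := by
    rw [← PySem.Dict.foldl_insert_getD_add_one_eq_counter, List.foldl_map]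
  have hhave : bl.foldl (fun d b => d.insert b (d.getD b 0 + 1)) PySem.Dict.empty
      = PySem.Dict.counter bl := PySem.Dict.foldl_insert_getD_add_one_eq_counter bl
  rw [hneed, hhave]
  simp only [PySem.Dict.items_counter, List.all_eq_true, List.mem_map, PySem.Dict.getD_counter, decide_eq_true_eq]
  constructor
  · intro hall k
    by_cases hk : k ∈ (al.map (fun a => PySem.Int.bxor v a))
    · exact hall (k, _) ⟨k, by simpa [PySem.Set.mem_ofList] using hk, rfl⟩
    · simp [List.count_eq_zero_of_not_mem hk]
  · rintro hall p ⟨k, hk, rfl⟩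
    exact hall k

-- ===== VERDICT (by name: the statement is the Claim_ definition above) =====
theorem check_spec : Claim_equal_check := by
  intro al bl v _
  unfold Spec_check
  have h := (check_iff al bl v).trans (check_alt_iff al bl v).symm
  cases ha : check al bl v <;> cases hb : check_alt al bl v <;> simp_all
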